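-- pv_equiv track=rewrite | github.com/pypi-data/pypi-mirror-40 | packages/mdspy/mdspy-1.0.18-py2-none-any.whl/mdspy/cache_queries.py | _is_query_cacheable
-- ===== SOURCE A (Python) =====
-- def _is_query_cacheable(q):
--     list_forbidden_keyword = ['thisMonth', 'now', 'sevenDaysAgo', 'today', 'yesterday', 'thirtyDaysAgo',
--                               'thisMonth',
--                               'lastMonth', 'thisQuarter', 'lastQuarter', 'thisYear', 'lastYear']
--     for k in list_forbidden_keyword:
--         if k.lower() in str(q).lower():
--             return False
--     return True
-- ===== SOURCE B (Python) =====
-- def _is_query_cacheable(q):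
--     list_forbidden_keyword = ['thisMonth', 'now', 'sevenDaysAgo', 'today', 'yesterday', 'thirtyDaysAgo',
--                               'thisMonth',
--                               'lastMonth', 'thisQuarter', 'lastQuarter', 'thisYear', 'lastYear']
--     s = str(q).lower()
--     kws = [k.lower() for k in list_forbidden_keyword]
--     return not any(any(s.startswith(k, i) for k in kws)
--                    for i in range(len(s) + 1))
-- ===== Notes on version B (the rewrite author's own statement) =====
-- stated objective: alternative
-- what changed: A scans the whole string once per forbidden keyword (keyword-driven substring tests with early return); B lowercases once and makes a single position-driven pass over the string, testing at each position whether any keyword starts there.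
import Mathlib
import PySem

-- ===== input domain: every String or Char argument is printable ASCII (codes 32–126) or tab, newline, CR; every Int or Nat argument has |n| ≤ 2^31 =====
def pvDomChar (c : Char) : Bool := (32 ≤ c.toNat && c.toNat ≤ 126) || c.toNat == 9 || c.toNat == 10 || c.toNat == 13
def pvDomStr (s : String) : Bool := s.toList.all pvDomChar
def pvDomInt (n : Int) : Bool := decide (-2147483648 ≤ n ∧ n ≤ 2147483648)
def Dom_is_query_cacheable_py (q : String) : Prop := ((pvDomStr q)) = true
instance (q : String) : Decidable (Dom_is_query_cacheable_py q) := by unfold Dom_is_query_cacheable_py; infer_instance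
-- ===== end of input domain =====

-- ===== PORT A =====
-- B changes nothing observable; header: B makes one position-driven pass instead of one substring scan per keyword (alternative decomposition, not claimed faster).
def pvKwA : List String := ["thisMonth", "now", "sevenDaysAgo", "today", "yesterday", "thirtyDaysAgo",
                            "thisMonth",
                            "lastMonth", "thisQuarter", "lastQuarter", "thisYear", "lastYear"]

-- the for-loop of A with its early 'return False'
def pvLoopA (q : String) : List String → Bool
  | [] => true
  | k :: rest =>
      if PySem.Str.isIn (PySem.Str.lower k) (PySem.Str.lower q) then false
      else pvLoopA q rest

def is_query_cacheable_py (q : String) : Bool := pvLoopA q pvKwA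

-- ===== PORT B =====
def pvKwB : List String := ["thisMonth", "now", "sevenDaysAgo", "today", "yesterday", "thirtyDaysAgo",
                            "thisMonth",
                            "lastMonth", "thisQuarter", "lastQuarter", "thisYear", "lastYear"]

def is_query_cacheable_py_alt (q : String) : Bool :=
  let s := (PySem.Str.lower q).toList
  let kws := pvKwB.map (fun k => (PySem.Str.lower k).toList)
  -- s.startswith(k, i) for 0 ≤ i ≤ len(s) is startswith on s.drop i
  !((List.range (s.length + 1)).any (fun i => kws.any (fun k => PySem.Chars.startswith (s.drop i) k)))

-- ===== PRECONDITION & SPEC =====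
def Spec_is_query_cacheable_py (q : String) (out : Bool) : Prop := out = is_query_cacheable_py_alt q
instance (q : String) (out : Bool) : Decidable (Spec_is_query_cacheable_py q out) := by unfold Spec_is_query_cacheable_py; infer_instance

-- ===== CLAIM (what is proved, stated in full; the proofs are below) =====
def Claim_equal_is_query_cacheable_py : Prop := ∀ (q : String), Dom_is_query_cacheable_py q → Spec_is_query_cacheable_py q (is_query_cacheable_py q)

-- ===== LEMMAS AND PROOFS =====

-- A's loop returns true iff no keyword (lowered) occurs in the lowered query
theorem pvLoopA_eq (q : String) (ks : List String) :
    pvLoopA q ks = !(ks.any (fun k => PySem.Str.isIn (PySem.Str.lower k) (PySem.Str.lower q))) := by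
  induction ks with
  | nil => rfl
  | cons k rest ih =>
      show (if PySem.Str.isIn (PySem.Str.lower k) (PySem.Str.lower q) then false
            else pvLoopA q rest) = _
      rw [List.any_cons]
      cases h : PySem.Str.isIn (PySem.Str.lower k) (PySem.Str.lower q)
      · rw [if_neg (by simp), ih, Bool.false_or]
      · rw [if_pos rfl, Bool.true_or]
        rfl

-- position-driven containment: sub starts at some position ≤ length ↔ sub occurs in s
theorem pv_pos_iff (s sub : List Char) :
    ((List.range (s.length + 1)).any (fun i => PySem.Chars.startswith (s.drop i) sub))
      = PySem.Chars.isIn sub s := by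
  by_cases h : PySem.Chars.isIn sub s = true
  · rw [h, List.any_eq_true]
    obtain ⟨j, hj⟩ := (PySem.Chars.exists_prefix_drop_iff_isIn sub s).2 h
    by_cases hle : j ≤ s.length
    · exact ⟨j, List.mem_range.2 (by omega), (PySem.Chars.startswith_iff _ _).2 hj⟩
    · have hnil : s.drop j = [] := List.drop_eq_nil_of_le (by omega)
      have hsub : sub = [] := List.prefix_nil.1 (hnil ▸ hj)
      exact ⟨0, List.mem_range.2 (by omega),
        (PySem.Chars.startswith_iff _ _).2 (by simp [hsub])⟩
  · rw [Bool.eq_false_iff.2 h, List.any_eq_false]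
    intro i _ hs
    exact h ((PySem.Chars.exists_prefix_drop_iff_isIn sub s).1
      ⟨i, (PySem.Chars.startswith_iff _ _).1 hs⟩)

-- ===== VERDICT (by name: the statement is the Claim_ definition above) =====
theorem is_query_cacheable_py_spec : Claim_equal_is_query_cacheable_py := by
  intro q _
  unfold Spec_is_query_cacheable_py
  show pvLoopA q pvKwA = _
  rw [pvLoopA_eq]
  unfold is_query_cacheable_py_alt
  congr 1
  rw [Bool.eq_iff_iff]
  simp only [List.any_eq_true, List.mem_range, List.mem_map]
  have hk : pvKwB = pvKwA := rfl
  constructor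
  · rintro ⟨k, hkm, hin⟩
    have hin' : PySem.Chars.isIn (PySem.Str.lower k).toList (PySem.Str.lower q).toList := by
      simpa [PySem.Str.isIn] using hin
    have := (pv_pos_iff (PySem.Str.lower q).toList (PySem.Str.lower k).toList).symm ▸ hin'
    obtain ⟨i, hi, hs⟩ := List.any_eq_true.1 this
    exact ⟨i, List.mem_range.1 hi, (PySem.Str.lower k).toList, ⟨k, hk ▸ hkm, rfl⟩, hs⟩
  · rintro ⟨i, hi, kl, ⟨k, hkm, rfl⟩, hs⟩
    refine ⟨k, hk ▸ hkm, ?_⟩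
    have : ((List.range ((PySem.Str.lower q).toList.length + 1)).any
        (fun j => PySem.Chars.startswith ((PySem.Str.lower q).toList.drop j) (PySem.Str.lower k).toList)) = true :=
      List.any_eq_true.2 ⟨i, List.mem_range.2 hi, hs⟩
    rw [pv_pos_iff] at this
    simpa [PySem.Str.isIn] using this
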